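-- pv_equiv track=rewrite | github.com/samfeldman824/putr_copy | backend/poker_utils.py | get_min_and_max_names
-- ===== SOURCE A (Python) =====
-- def get_min_and_max_names(amount_dict: dict) -> tuple[list, list]:
--     """
--     Returns the names with the maximum and minimum amounts from the given
--     amount_dict.
--
--     Args:
--         amount_dict (dict): A dictionary containing names as keys and amounts
--         as values.
--
--     Returns:
--         tuple: A tuple containing two lists - the names with the maximum amount
--         and the names with the minimum amount.
--     """
--     min_names = []
--     max_names = []
--     min_amount = float('inf')
--     max_amount = float('-inf')
--
--     for name, amount in amount_dict.items():
--         if amount == max_amount: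
--             max_names.append(name)
--         elif amount > max_amount:
--             max_names = [name]
--             max_amount = amount
--
--         if amount == min_amount:
--             min_names.append(name)
--         elif amount < min_amount:
--             min_names = [name]
--             min_amount = amount
--
--     return max_names, min_names
-- ===== SOURCE B (Python) =====
-- def get_min_and_max_names(amount_dict: dict) -> tuple[list, list]:
--     if not amount_dict:
--         return [], []
--     max_amount = max(amount_dict.values())
--     min_amount = min(amount_dict.values())
--     max_names = [name for name, amount in amount_dict.items() if amount == max_amount]
--     min_names = [name for name, amount in amount_dict.items() if amount == min_amount]
--     return max_names, min_names
-- ===== Notes on version B (the rewrite author's own statement) =====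
-- stated objective: simpler
-- what changed: Replaces the single incremental loop that maintains running max/min with candidate-list rebuilding by two builtin max()/min() calls over the values plus two order-preserving comprehensions selecting the matching names.
import Mathlib
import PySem

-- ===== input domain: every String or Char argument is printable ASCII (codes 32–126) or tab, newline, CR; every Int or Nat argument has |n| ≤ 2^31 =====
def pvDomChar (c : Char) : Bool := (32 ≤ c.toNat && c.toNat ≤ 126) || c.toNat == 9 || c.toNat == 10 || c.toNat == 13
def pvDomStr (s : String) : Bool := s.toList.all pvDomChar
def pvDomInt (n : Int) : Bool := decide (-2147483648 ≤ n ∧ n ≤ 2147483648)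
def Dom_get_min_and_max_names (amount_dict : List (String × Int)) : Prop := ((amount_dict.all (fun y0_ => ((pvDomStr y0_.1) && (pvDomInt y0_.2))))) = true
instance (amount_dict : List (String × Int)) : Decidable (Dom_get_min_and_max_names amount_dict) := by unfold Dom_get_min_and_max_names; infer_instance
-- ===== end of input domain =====

-- B replaces A's single incremental loop (running max/min with candidate-list rebuilding)
-- by builtin max()/min() over the values plus two order-preserving selections; objective: simpler.

-- ===== PORT A =====
-- A's single loop; `none` plays the role of the float('-inf')/float('inf') sentinels, which
-- an int amount never equals and always exceeds/undercuts, so the `none` arm takes the elif branch.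
def pvLoopA : List (String × Int) → List String → Option Int → List String → Option Int →
    List String × List String
  | [], maxN, _, minN, _ => (maxN, minN)
  | (name, a) :: rest, maxN, maxA, minN, minA =>
    let s1 : List String × Option Int :=
      match maxA with
      | none => ([name], some a)
      | some M => if a = M then (maxN ++ [name], some M)
                  else if a > M then ([name], some a)
                  else (maxN, some M)
    let s2 : List String × Option Int :=
      match minA with
      | none => ([name], some a)
      | some m => if a = m then (minN ++ [name], some m)
                  else if a < m then ([name], some a)
                  else (minN, some m)
    pvLoopA rest s1.1 s1.2 s2.1 s2.2

def get_min_and_max_names (amount_dict : List (String × Int)) : List String × List String :=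
  pvLoopA amount_dict [] none [] none

-- ===== PORT B =====
def get_min_and_max_names_alt (amount_dict : List (String × Int)) : List String × List String :=
  match amount_dict with
  | [] => ([], [])
  | _ :: _ =>
    let vals := amount_dict.map Prod.snd
    match PySem.List.max? vals (fun v => v), PySem.List.min? vals (fun v => v) with
    | some maxAmount, some minAmount =>
      ((amount_dict.filter (fun p => p.2 == maxAmount)).map Prod.fst,
       (amount_dict.filter (fun p => p.2 == minAmount)).map Prod.fst)
    | _, _ => ([], [])  -- unreachable: vals is nonempty

-- ===== PRECONDITION & SPEC =====
def Spec_get_min_and_max_names (amount_dict : List (String × Int)) (out : List String × List String) : Prop := out = get_min_and_max_names_alt amount_dict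
instance (amount_dict : List (String × Int)) (out : List String × List String) : Decidable (Spec_get_min_and_max_names amount_dict out) := by unfold Spec_get_min_and_max_names; infer_instance

-- ===== CLAIM (what is proved, stated in full; the proofs are below) =====
def Claim_equal_get_min_and_max_names : Prop := ∀ (amount_dict : List (String × Int)), Dom_get_min_and_max_names amount_dict → Spec_get_min_and_max_names amount_dict (get_min_and_max_names amount_dict)

-- ===== LEMMAS AND PROOFS =====

-- the two independent halves of A's loop
def pvLoopMax : List (String × Int) → List String → Option Int → List String
  | [], maxN, _ => maxN
  | (name, a) :: rest, maxN, maxA =>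
    match maxA with
    | none => pvLoopMax rest [name] (some a)
    | some M => if a = M then pvLoopMax rest (maxN ++ [name]) (some M)
                else if a > M then pvLoopMax rest [name] (some a)
                else pvLoopMax rest maxN (some M)

def pvLoopMin : List (String × Int) → List String → Option Int → List String
  | [], minN, _ => minN
  | (name, a) :: rest, minN, minA =>
    match minA with
    | none => pvLoopMin rest [name] (some a)
    | some m => if a = m then pvLoopMin rest (minN ++ [name]) (some m)
                else if a < m then pvLoopMin rest [name] (some a)
                else pvLoopMin rest minN (some m)

def pvKeysEq (l : List (String × Int)) (v : Int) : List String :=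
  (l.filter (fun p => p.2 == v)).map Prod.fst

def pvFMax (l : List (String × Int)) (M : Int) : Int := l.foldl (fun acc p => max acc p.2) M
def pvFMin (l : List (String × Int)) (m : Int) : Int := l.foldl (fun acc p => min acc p.2) m

theorem pvLoopA_split : ∀ (l : List (String × Int)) maxN maxA minN minA,
    pvLoopA l maxN maxA minN minA = (pvLoopMax l maxN maxA, pvLoopMin l minN minA) := by
  intro l
  induction l with
  | nil => intro _ _ _ _; rfl
  | cons x rest ih =>
    intro maxN maxA minN minA
    obtain ⟨name, a⟩ := x
    cases maxA <;> cases minA <;> simp only [pvLoopA, pvLoopMax, pvLoopMin] <;>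
      (try split_ifs) <;> exact ih _ _ _ _

theorem pvFMax_le : ∀ (l : List (String × Int)) (M : Int), M ≤ pvFMax l M := by
  intro l
  induction l with
  | nil => intro M; exact le_refl M
  | cons x rest ih =>
    intro M
    exact le_trans (le_max_left M x.2) (ih (max M x.2))

theorem pvFMax_all : ∀ (l : List (String × Int)) (M : Int),
    l.all (fun p => decide (p.2 ≤ M)) = true → pvFMax l M = M := by
  intro l
  induction l with
  | nil => intro M _; rfl
  | cons x rest ih =>
    intro M h
    simp only [List.all_cons, Bool.and_eq_true, decide_eq_true_eq] at h
    have : max M x.2 = M := max_eq_left h.1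
    simpa [pvFMax, this] using ih M (by simpa using h.2)

theorem pvFMax_gt : ∀ (l : List (String × Int)) (M : Int),
    l.all (fun p => decide (p.2 ≤ M)) = false → M < pvFMax l M := by
  intro l
  induction l with
  | nil => intro M h; simp at h
  | cons x rest ih =>
    intro M h
    simp only [List.all_cons, Bool.and_eq_false_iff] at h
    by_cases hx : x.2 ≤ M
    · have hM : max M x.2 = M := max_eq_left hx
      have hr : rest.all (fun p => decide (p.2 ≤ M)) = false := by
        cases h with
        | inl h => simp [hx] at h
        | inr h => exact h
      simpa [pvFMax, hM] using ih M hr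
    · rw [not_le] at hx
      calc M < x.2 := hx
        _ ≤ pvFMax rest x.2 := pvFMax_le rest x.2
        _ = pvFMax rest (max M x.2) := by rw [max_eq_right (le_of_lt hx)]
        _ = pvFMax (x :: rest) M := rfl

theorem pvFMin_le : ∀ (l : List (String × Int)) (m : Int), pvFMin l m ≤ m := by
  intro l
  induction l with
  | nil => intro m; exact le_refl m
  | cons x rest ih =>
    intro m
    exact le_trans (ih (min m x.2)) (min_le_left m x.2)

theorem pvFMin_all : ∀ (l : List (String × Int)) (m : Int),
    l.all (fun p => decide (m ≤ p.2)) = true → pvFMin l m = m := by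
  intro l
  induction l with
  | nil => intro m _; rfl
  | cons x rest ih =>
    intro m h
    simp only [List.all_cons, Bool.and_eq_true, decide_eq_true_eq] at h
    have : min m x.2 = m := min_eq_left h.1
    simpa [pvFMin, this] using ih m (by simpa using h.2)

theorem pvFMin_lt : ∀ (l : List (String × Int)) (m : Int),
    l.all (fun p => decide (m ≤ p.2)) = false → pvFMin l m < m := by
  intro l
  induction l with
  | nil => intro m h; simp at h
  | cons x rest ih =>
    intro m h
    simp only [List.all_cons, Bool.and_eq_false_iff] at h
    by_cases hx : m ≤ x.2
    · have hm : min m x.2 = m := min_eq_left hx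
      have hr : rest.all (fun p => decide (m ≤ p.2)) = false := by
        cases h with
        | inl h => simp [hx] at h
        | inr h => exact h
      simpa [pvFMin, hm] using ih m hr
    · rw [not_le] at hx
      calc pvFMin (x :: rest) m = pvFMin rest (min m x.2) := rfl
        _ = pvFMin rest x.2 := by rw [min_eq_right (le_of_lt hx)]
        _ ≤ x.2 := pvFMin_le rest x.2
        _ < m := hx

theorem pvKeysEq_cons_ne (name : String) (a v : Int) (rest : List (String × Int)) (h : a ≠ v) :
    pvKeysEq ((name, a) :: rest) v = pvKeysEq rest v := by
  simp [pvKeysEq, h]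

theorem pvKeysEq_cons_eq (name : String) (v : Int) (rest : List (String × Int)) :
    pvKeysEq ((name, v) :: rest) v = name :: pvKeysEq rest v := by
  simp [pvKeysEq]

theorem pvLoopMax_char : ∀ (l : List (String × Int)) (maxN : List String) (M : Int),
    pvLoopMax l maxN (some M) =
      (if l.all (fun p => decide (p.2 ≤ M)) then maxN else []) ++ pvKeysEq l (pvFMax l M) := by
  intro l
  induction l with
  | nil => intro maxN M; simp [pvLoopMax, pvKeysEq, pvFMax]
  | cons x rest ih =>
    intro maxN M
    obtain ⟨name, a⟩ := x
    simp only [pvLoopMax]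
    by_cases h1 : a = M
    · subst h1
      rw [if_pos rfl, ih]
      have hF : pvFMax ((name, a) :: rest) a = pvFMax rest a := by simp [pvFMax]
      rw [hF]
      by_cases hall : rest.all (fun p => decide (p.2 ≤ a)) = true
      · have hFa : pvFMax rest a = a := pvFMax_all rest a hall
        simp [hall, hFa, pvKeysEq_cons_eq]
      · have hgt : a < pvFMax rest a :=
          pvFMax_gt rest a (by simpa using hall)
        rw [pvKeysEq_cons_ne _ _ _ _ (ne_of_lt hgt)]
        simp [hall]
    · rw [if_neg h1]
      by_cases h2 : a > M
      · rw [if_pos h2, ih]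
        have hF : pvFMax ((name, a) :: rest) M = pvFMax rest a := by
          simp [pvFMax, max_eq_right (le_of_lt h2)]
        rw [hF]
        have hnot : ((name, a) :: rest).all (fun p => decide (p.2 ≤ M)) = false := by
          simp [not_le.mpr h2]
        rw [hnot]
        by_cases hall : rest.all (fun p => decide (p.2 ≤ a)) = true
        · have hFa : pvFMax rest a = a := pvFMax_all rest a hall
          simp [hall, hFa, pvKeysEq_cons_eq]
        · have hgt : a < pvFMax rest a := pvFMax_gt rest a (by simpa using hall)
          rw [pvKeysEq_cons_ne _ _ _ _ (ne_of_lt hgt)]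
          simp [hall]
      · rw [if_neg h2, ih]
        rw [not_lt] at h2
        have ha : a < M := lt_of_le_of_ne h2 h1
        have hF : pvFMax ((name, a) :: rest) M = pvFMax rest M := by
          simp [pvFMax, max_eq_left (le_of_lt ha)]
        rw [hF]
        have hlt : a < pvFMax rest M := lt_of_lt_of_le ha (pvFMax_le rest M)
        rw [pvKeysEq_cons_ne _ _ _ _ (ne_of_lt hlt)]
        have : (((name, a) :: rest).all (fun p => decide (p.2 ≤ M)))
             = (rest.all (fun p => decide (p.2 ≤ M))) := by simp [le_of_lt ha]
        rw [this]

theorem pvLoopMin_char : ∀ (l : List (String × Int)) (minN : List String) (m : Int),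
    pvLoopMin l minN (some m) =
      (if l.all (fun p => decide (m ≤ p.2)) then minN else []) ++ pvKeysEq l (pvFMin l m) := by
  intro l
  induction l with
  | nil => intro minN m; simp [pvLoopMin, pvKeysEq, pvFMin]
  | cons x rest ih =>
    intro minN m
    obtain ⟨name, a⟩ := x
    simp only [pvLoopMin]
    by_cases h1 : a = m
    · subst h1
      rw [if_pos rfl, ih]
      have hF : pvFMin ((name, a) :: rest) a = pvFMin rest a := by simp [pvFMin]
      rw [hF]
      by_cases hall : rest.all (fun p => decide (a ≤ p.2)) = true
      · have hFa : pvFMin rest a = a := pvFMin_all rest a hall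
        simp [hall, hFa, pvKeysEq_cons_eq]
      · have hlt : pvFMin rest a < a :=
          pvFMin_lt rest a (by simpa using hall)
        rw [pvKeysEq_cons_ne _ _ _ _ (ne_of_gt hlt)]
        simp [hall]
    · rw [if_neg h1]
      by_cases h2 : a < m
      · rw [if_pos h2, ih]
        have hF : pvFMin ((name, a) :: rest) m = pvFMin rest a := by
          simp [pvFMin, min_eq_right (le_of_lt h2)]
        rw [hF]
        have hnot : ((name, a) :: rest).all (fun p => decide (m ≤ p.2)) = false := by
          simp [not_le.mpr h2]
        rw [hnot]
        by_cases hall : rest.all (fun p => decide (a ≤ p.2)) = true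
        · have hFa : pvFMin rest a = a := pvFMin_all rest a hall
          simp [hall, hFa, pvKeysEq_cons_eq]
        · have hlt : pvFMin rest a < a := pvFMin_lt rest a (by simpa using hall)
          rw [pvKeysEq_cons_ne _ _ _ _ (ne_of_gt hlt)]
          simp [hall]
      · rw [if_neg h2, ih]
        rw [not_lt] at h2
        have ha : m < a := lt_of_le_of_ne h2 (Ne.symm h1)
        have hF : pvFMin ((name, a) :: rest) m = pvFMin rest m := by
          simp [pvFMin, min_eq_left (le_of_lt ha)]
        rw [hF]
        have hgt : pvFMin rest m < a := lt_of_le_of_lt (pvFMin_le rest m) ha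
        rw [pvKeysEq_cons_ne _ _ _ _ (ne_of_gt hgt)]
        have : (((name, a) :: rest).all (fun p => decide (m ≤ p.2)))
             = (rest.all (fun p => decide (m ≤ p.2))) := by simp [le_of_lt ha]
        rw [this]

-- ===== VERDICT (by name: the statement is the Claim_ definition above) =====
theorem get_min_and_max_names_spec : Claim_equal_get_min_and_max_names := by
  intro l _
  unfold Spec_get_min_and_max_names get_min_and_max_names get_min_and_max_names_alt
  match l with
  | [] => rfl
  | (name, a) :: rest =>
    rw [pvLoopA_split]
    simp only [pvLoopMax, pvLoopMin]
    rw [pvLoopMax_char, pvLoopMin_char]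
    have hmax : PySem.List.max? (((name, a) :: rest).map Prod.snd) (fun v => v)
        = some (pvFMax rest a) := by
      simp [PySem.List.max?_id_cons, pvFMax, List.foldl_map]
    have hmin : PySem.List.min? (((name, a) :: rest).map Prod.snd) (fun v => v)
        = some (pvFMin rest a) := by
      simp [PySem.List.min?_id_cons, pvFMin, List.foldl_map]
    simp only [hmax, hmin, Prod.mk.injEq]
    refine ⟨?_, ?_⟩
    · by_cases hall : rest.all (fun p => decide (p.2 ≤ a)) = true
      · have hFa : pvFMax rest a = a := pvFMax_all rest a hall
        rw [hall, hFa]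
        rw [show ((name, a) :: rest).filter (fun p => p.2 == a)
              = (name, a) :: rest.filter (fun p => p.2 == a) by simp]
        simp [pvKeysEq]
      · have hgt : a < pvFMax rest a := pvFMax_gt rest a (by simpa using hall)
        have hf : rest.all (fun p => decide (p.2 ≤ a)) = false := Bool.eq_false_iff.mpr hall
        rw [hf]
        rw [show ((name, a) :: rest).filter (fun p => p.2 == pvFMax rest a)
              = rest.filter (fun p => p.2 == pvFMax rest a) by simp [ne_of_lt hgt]]
        simp [pvKeysEq]
    · by_cases hall : rest.all (fun p => decide (a ≤ p.2)) = true
      · have hFa : pvFMin rest a = a := pvFMin_all rest a hall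
        rw [hall, hFa]
        rw [show ((name, a) :: rest).filter (fun p => p.2 == a)
              = (name, a) :: rest.filter (fun p => p.2 == a) by simp]
        simp [pvKeysEq]
      · have hlt : pvFMin rest a < a := pvFMin_lt rest a (by simpa using hall)
        have hf : rest.all (fun p => decide (a ≤ p.2)) = false := Bool.eq_false_iff.mpr hall
        rw [hf]
        rw [show ((name, a) :: rest).filter (fun p => p.2 == pvFMin rest a)
              = rest.filter (fun p => p.2 == pvFMin rest a) by simp [ne_of_gt hlt]]
        simp [pvKeysEq]
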